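-- pv_equiv track=rewrite | github.com/gauravd327/Python-Programs | Games/Chess/Pieces.py | validList
-- ===== SOURCE A (Python) =====
-- def validList(board, piece, y, x):
--     poslist = []
--     for i in range(len(board)):
--         for j in range(len(board[i])):
--             valid = True
--             z, new_y, new_x = 1, 0, 0
--             if i == y or j == x:
--                 while z < max(abs(x - j), abs(y - i)):
--                     if i == y:
--                         if j > x:
--                             new_y, new_x = y, j - z
--
--                         elif j < x:
--                             new_y, new_x = y, (j + abs(x - j)) - z
--
--                     elif j == x:
--                         if i > y:
--                             new_y, new_x = i - z, x
--
--                         elif i < y: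
--                             new_y, new_x = (i + abs(y - i)) - z, x
--
--                     if board[new_y][new_x] != 0:
--                         valid = False
--                         break
--
--                     z += 1
--                 if valid:
--                     if (board[i][j] * piece) <= 0:
--                         poslist.append([i, j])
--
--     return poslist
-- ===== SOURCE B (Python) =====
-- def validList(board, piece, y, x):
--     # Scan outward in the four rook directions, stopping at the first blocker,
--     # then emit the reachable squares in row-major order. O(h+w).
--     h = len(board)
--     if not (0 <= y < h and 0 <= x < len(board[y])):
--         return []  # the rook is not on a valid square: no moves
--     w = len(board[y])
--
--     def ray(cells):
--         out = []
--         for i, j in cells: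
--             out.append((i, j))
--             if board[i][j] != 0:
--                 break
--         return out
--
--     up = ray((i, x) for i in range(y - 1, -1, -1))
--     down = ray((i, x) for i in range(y + 1, h))
--     left = ray((y, j) for j in range(x - 1, -1, -1))
--     right = ray((y, j) for j in range(x + 1, w))
--
--     cells = up[::-1] + left[::-1] + [(y, x)] + right + down
--     return [[i, j] for i, j in cells if board[i][j] * piece <= 0]
-- ===== Notes on version B (the rewrite author's own statement) =====
-- stated objective: faster
-- what changed: Instead of testing every board square and re-walking the whole line between it and the rook (nested loops with an inner while), B scans outward from the rook once in each of the four directions, stopping at the first blocker, and emits the reachable squares in row-major order (with an early 'rook not on a valid square -> no moves' guard).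
-- outside the precondition, e.g. on validList([[0, 0], [0, 0]], 1, 0, -1): A returns [[0, 0], [0, 1]], B returns []; on validList([[0, 0], [0]], 1, 0, 1): A returns [[0, 0], [0, 1]], B raises IndexError
import Mathlib
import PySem

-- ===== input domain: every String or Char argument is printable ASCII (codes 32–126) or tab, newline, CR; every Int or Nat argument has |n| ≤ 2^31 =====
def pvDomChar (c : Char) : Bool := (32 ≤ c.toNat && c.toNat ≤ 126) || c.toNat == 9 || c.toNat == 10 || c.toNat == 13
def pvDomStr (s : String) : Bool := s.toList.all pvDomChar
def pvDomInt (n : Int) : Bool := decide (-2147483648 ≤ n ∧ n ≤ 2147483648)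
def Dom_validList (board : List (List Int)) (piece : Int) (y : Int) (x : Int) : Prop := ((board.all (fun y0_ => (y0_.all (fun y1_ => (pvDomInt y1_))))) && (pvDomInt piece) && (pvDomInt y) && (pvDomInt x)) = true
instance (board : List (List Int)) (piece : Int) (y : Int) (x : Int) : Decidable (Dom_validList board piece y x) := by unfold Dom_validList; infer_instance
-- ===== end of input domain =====

-- B replaces A's per-square line re-walk (nested loops + inner while) by four outward scans
-- from the rook that stop at the first blocker (measured faster in a timing run);
-- equivalence is proved on Pre_validList: boards whose every row reaches column x with the
-- rook at (y, x) on the board, plus the off-board case where A's loops never fire.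

-- ===== PORT A =====
-- Python's abs on int
def pyAbs (n : Int) : Int := if n < 0 then -n else n

-- the inner 'while z < max(abs(x-j), abs(y-i))' loop of A; fuel = number of remaining
-- iterations (max(..).toNat suffices since z starts at 1 and grows by 1).
-- board[new_y][new_x] is ported as getD on .toNat indices: inside Pre_validList the
-- visited indices are exactly the in-range squares strictly between (y,x) and (i,j),
-- so this is exact there.
-- the body's assignment to (new_y, new_x)
def pickA (y x i j z : Int) : Int × Int :=
  if i = y then
    (if j > x then (y, j - z)
     else if j < x then (y, (j + pyAbs (x - j)) - z)
     else (0, 0))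
  else if j = x then
    (if i > y then (i - z, x)
     else if i < y then ((i + pyAbs (y - i)) - z, x)
     else (0, 0))
  else (0, 0)

def whileA (board : List (List Int)) (y x i j : Int) : Nat → Int → Bool
  | 0, _ => true
  | fuel+1, z =>
      if z < max (pyAbs (x - j)) (pyAbs (y - i)) then
        if ((board.getD (pickA y x i j z).1.toNat []).getD (pickA y x i j z).2.toNat 0) ≠ 0 then false
        else whileA board y x i j fuel (z + 1)
      else true

def validList (board : List (List Int)) (piece : Int) (y : Int) (x : Int) : List (List Int) :=
  (List.range board.length).foldl (fun pos i =>
    (List.range (board.getD i []).length).foldl (fun (pos : List (List Int)) (j : Nat) =>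
      if ((i : Int) = y ∨ (j : Int) = x) then
        if whileA board y x (i : Int) (j : Int)
            (max (pyAbs (x - (j : Int))) (pyAbs (y - (i : Int)))).toNat 1 then
          if (board.getD i []).getD j 0 * piece ≤ 0 then pos ++ [[(i : Int), (j : Int)]]
          else pos
        else pos
      else pos) pos) []

-- ===== PORT B =====
def cellB (board : List (List Int)) (i j : Nat) : Int := (board.getD i []).getD j 0

-- outward scan towards smaller indices: k-1, k-2, …, 0, stopping after the first blocker
def rayDown (get : Nat → Int) : Nat → List Nat
  | 0 => []
  | k+1 => k :: (if get k ≠ 0 then [] else rayDown get k)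

-- outward scan towards larger indices: s, s+1, …, hi-1, stopping after the first blocker
def rayUp (get : Nat → Int) (s hi : Nat) : List Nat :=
  if _h : s < hi then s :: (if get s ≠ 0 then [] else rayUp get (s+1) hi) else []
  termination_by hi - s

def validList_alt (board : List (List Int)) (piece : Int) (y : Int) (x : Int) : List (List Int) :=
  if 0 ≤ y ∧ y < (board.length : Int) ∧ 0 ≤ x ∧ x < ((board.getD y.toNat []).length : Int) then
  let h := board.length
  let w := (board.getD y.toNat []).length
  let yn := y.toNat
  let xn := x.toNat
  let up := rayDown (fun i => cellB board i xn) yn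
  let down := rayUp (fun i => cellB board i xn) (yn+1) h
  let left := rayDown (fun j => cellB board yn j) xn
  let right := rayUp (fun j => cellB board yn j) (xn+1) w
  let cells := up.reverse.map (fun i => (i, xn)) ++ left.reverse.map (fun j => (yn, j))
      ++ [(yn, xn)] ++ right.map (fun j => (yn, j)) ++ down.map (fun i => (i, xn))
  (cells.filter (fun c => cellB board c.1 c.2 * piece ≤ 0)).map
    (fun c => [(c.1 : Int), (c.2 : Int)])
  else []

-- ===== PRECONDITION & SPEC =====
-- Pre_ covers the two regions where A's value is the rook-move list (or the empty list):
-- the rook is on the board and every row reaches column x, or the rook's row is off the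
-- board and no row has a column x. Outside them A either raises IndexError or returns
-- values produced by negative-index wraparound / walks across ragged rows, where B
-- may raise or returns its natural 'no moves' answer.
def Pre_validList (board : List (List Int)) (piece : Int) (y : Int) (x : Int) : Prop :=
  (0 ≤ y ∧ y < (board.length : Int) ∧ 0 ≤ x ∧ ∀ row ∈ board, x < (row.length : Int))
  ∨ ((y < 0 ∨ (board.length : Int) ≤ y) ∧ ∀ row ∈ board, ¬ (0 ≤ x ∧ x < (row.length : Int)))
instance (board : List (List Int)) (piece : Int) (y : Int) (x : Int) : Decidable (Pre_validList board piece y x) := by unfold Pre_validList; infer_instance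

def pvWitness_validList : List (List Int) × Int × Int × Int := ([[0, 1], [2, 0]], 1, 0, 0)

def Spec_validList (board : List (List Int)) (piece : Int) (y : Int) (x : Int) (out : List (List Int)) : Prop := out = validList_alt board piece y x
instance (board : List (List Int)) (piece : Int) (y : Int) (x : Int) (out : List (List Int)) : Decidable (Spec_validList board piece y x out) := by unfold Spec_validList; infer_instance

-- ===== CLAIM (what is proved, stated in full; the proofs are below) =====
def Claim_equal_validList : Prop := ∀ (board : List (List Int)) (piece : Int) (y : Int) (x : Int), Dom_validList board piece y x → Pre_validList board piece y x → Spec_validList board piece y x (validList board piece y x)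

-- ===== LEMMAS AND PROOFS =====

-- 'all squares strictly between a and b (a ≤ b) are empty'
def clr (get : Nat → Int) (a b : Nat) : Bool := decide (∀ k, k < b → a < k → get k = 0)

theorem rayDown_eq (get : Nat → Int) : ∀ n, rayDown get n = ((List.range n).filter (fun a => clr get a n)).reverse := by
  intro n
  induction n with
  | zero => rfl
  | succ n ih =>
    have hn : (fun a => clr get a (n+1)) n = true := by
      simp only [clr, decide_eq_true_eq]; omega
    rw [List.range_succ, List.filter_append, List.reverse_append]
    simp only [List.filter_cons, List.filter_nil, hn, if_true, List.reverse_cons,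
        List.reverse_nil, List.nil_append]
    show n :: (if get n ≠ 0 then [] else rayDown get n)
        = [n] ++ (List.filter (fun a => clr get a (n+1)) (List.range n)).reverse
    by_cases h : get n = 0
    · rw [if_neg (by simpa using h)]
      have hc : ∀ a ∈ List.range n, clr get a (n+1) = clr get a n := by
        intro a _
        simp only [clr, decide_eq_decide]
        constructor
        · intro H k hk hak; exact H k (by omega) hak
        · intro H k hk hak
          by_cases hkn : k = n
          · subst hkn; exact h
          · exact H k (by omega) hak
      rw [List.filter_congr hc, ← ih]; rfl
    · rw [if_pos (by simpa using h)]
      have hc : ∀ a ∈ List.range n, clr get a (n+1) = false := by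
        intro a ha
        simp only [clr, decide_eq_false_iff_not]
        intro H
        exact h (H n (by omega) (List.mem_range.mp ha))
      rw [List.filter_congr hc]
      simp

theorem rayUp_eq (get : Nat → Int) : ∀ (fuel a hi : Nat), hi ≤ a + 1 + fuel →
    rayUp get (a+1) hi = (List.range' (a+1) (hi - (a+1))).filter (fun b => clr get a b) := by
  intro fuel
  induction fuel with
  | zero =>
    intro a hi hle
    rw [rayUp, dif_neg (by omega : ¬ (a+1 < hi))]
    rw [(by omega : hi - (a+1) = 0)]; rfl
  | succ fuel ih =>
    intro a hi hle
    rw [rayUp]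
    by_cases h : a + 1 < hi
    · rw [dif_pos h, (by omega : hi - (a+1) = (hi - (a+2)) + 1), List.range'_succ]
      have hhead : (fun b => clr get a b) (a+1) = true := by
        simp only [clr, decide_eq_true_eq]; omega
      rw [List.filter_cons_of_pos hhead]
      by_cases hz : get (a+1) = 0
      · rw [if_neg (by simpa using hz)]
        rw [ih (a+1) hi (by omega)]
        congr 1
        apply List.filter_congr
        intro b hb
        have hbge : a + 2 ≤ b := (List.mem_range'_1.mp hb).1
        simp only [clr, decide_eq_decide]
        constructor
        · intro H k hk hak
          by_cases hka : k = a + 1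
          · subst hka; exact hz
          · exact H k hk (by omega)
        · intro H k hk hak; exact H k hk (by omega)
      · rw [if_pos (by simpa using hz)]
        have hc : ∀ b ∈ List.range' (a+2) (hi - (a+2)), clr get a b = false := by
          intro b hb
          have hbge : a + 2 ≤ b := (List.mem_range'_1.mp hb).1
          simp only [clr, decide_eq_false_iff_not]
          intro H
          exact hz (H (a+1) (by omega) (by omega))
        rw [List.filter_congr hc]
        simp
    · rw [dif_neg h]
      rw [(by omega : hi - (a+1) = 0)]; rfl

-- the inner while loop checks exactly the squares strictly between the two endpoints
theorem whileA_char (board : List (List Int)) (y x i j : Int) (g : Nat → Int) (lo hi : Nat)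
    (hd : max (pyAbs (x - j)) (pyAbs (y - i)) = (hi : Int) - lo)
    (hcell : ∀ z : Int, 1 ≤ z → z < (hi : Int) - lo →
      ((board.getD (pickA y x i j z).1.toNat []).getD (pickA y x i j z).2.toNat 0)
        = g ((hi : Int) - z).toNat) :
    ∀ (fuel : Nat) (z : Int), 1 ≤ z → ((hi : Int) - lo) - z ≤ fuel →
    (whileA board y x i j fuel z = true ↔
      ∀ k : Nat, lo < k → (k : Int) ≤ (hi : Int) - z → g k = 0) := by
  intro fuel
  induction fuel with
  | zero =>
    intro z hz hle
    simp only [whileA]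
    constructor
    · intro _ k h1 h2; exfalso; omega
    · intro _; trivial
  | succ fuel ih =>
    intro z hz hle
    rw [whileA, hd]
    by_cases hlt : z < (hi : Int) - lo
    · rw [if_pos hlt, hcell z hz hlt]
      by_cases hc : g ((hi : Int) - z).toNat = 0
      · rw [if_neg (by simpa using hc), ih (z + 1) (by omega) (by omega)]
        constructor
        · intro H k h1 h2
          by_cases hke : (k : Int) = (hi : Int) - z
          · have : k = ((hi : Int) - z).toNat := by omega
            rw [this]; exact hc
          · exact H k h1 (by omega)
        · intro H k h1 h2; exact H k h1 (by omega)
      · rw [if_pos (by simpa using hc)]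
        constructor
        · intro hfalse; exact absurd hfalse (by simp)
        · intro H; exact absurd (H ((hi : Int) - z).toNat (by omega) (by omega)) hc
    · rw [if_neg hlt]
      constructor
      · intro _ k h1 h2; exfalso; omega
      · intro _; trivial

theorem whileA_row (board : List (List Int)) (yn xn j : Nat) :
    whileA board (yn : Int) (xn : Int) (yn : Int) (j : Int)
        (max (pyAbs ((xn : Int) - j)) (pyAbs ((yn : Int) - yn))).toNat 1 = true ↔
    clr (fun k => cellB board yn k) (min j xn) (max j xn) = true := by
  have hd : max (pyAbs ((xn : Int) - j)) (pyAbs ((yn : Int) - yn))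
      = ((max j xn : Nat) : Int) - (min j xn : Nat) := by
    simp only [pyAbs]; split_ifs <;> push_cast <;> omega
  have hcell : ∀ z : Int, 1 ≤ z → z < ((max j xn : Nat) : Int) - (min j xn : Nat) →
      ((board.getD (pickA (yn : Int) (xn : Int) (yn : Int) (j : Int) z).1.toNat []).getD
        (pickA (yn : Int) (xn : Int) (yn : Int) (j : Int) z).2.toNat 0)
      = (fun k => cellB board yn k) (((max j xn : Nat) : Int) - z).toNat := by
    intro z h1 h2
    rcases Nat.lt_trichotomy j xn with hjx | hjx | hjx
    · have hp : pickA (yn : Int) (xn : Int) (yn : Int) (j : Int) z = ((yn : Int), (xn : Int) - z) := by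
        rw [pickA, if_pos rfl]
        simp only [pyAbs]
        split_ifs with hc1 hc2 hc3 <;> first
          | (exfalso; omega)
          | rfl
          | (simp only [Prod.mk.injEq, true_and, and_true]; omega)
      rw [hp]; simp only [cellB]; congr 2 <;> omega
    · exfalso; subst hjx; omega
    · have hp : pickA (yn : Int) (xn : Int) (yn : Int) (j : Int) z = ((yn : Int), (j : Int) - z) := by
        rw [pickA, if_pos rfl]
        simp only [pyAbs]
        split_ifs with hc1 hc2 hc3 <;> first
          | (exfalso; omega)
          | rfl
          | (simp only [Prod.mk.injEq, true_and, and_true]; omega)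
      rw [hp]; simp only [cellB]; congr 2 <;> omega
  rw [whileA_char board _ _ _ _ (fun k => cellB board yn k) (min j xn) (max j xn) hd hcell
      (max (pyAbs ((xn : Int) - j)) (pyAbs ((yn : Int) - yn))).toNat 1 (by omega) (by rw [hd]; omega)]
  simp only [clr, decide_eq_true_eq]
  constructor
  · intro H k h1 h2; exact H k h2 (by omega)
  · intro H k h1 h2; exact H k (by omega) h1

theorem whileA_col (board : List (List Int)) (yn xn i : Nat) (hne : i ≠ yn) :
    whileA board (yn : Int) (xn : Int) (i : Int) (xn : Int)
        (max (pyAbs ((xn : Int) - xn)) (pyAbs ((yn : Int) - i))).toNat 1 = true ↔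
    clr (fun k => cellB board k xn) (min i yn) (max i yn) = true := by
  have hd : max (pyAbs ((xn : Int) - xn)) (pyAbs ((yn : Int) - i))
      = ((max i yn : Nat) : Int) - (min i yn : Nat) := by
    simp only [pyAbs]; split_ifs <;> push_cast <;> omega
  have hcell : ∀ z : Int, 1 ≤ z → z < ((max i yn : Nat) : Int) - (min i yn : Nat) →
      ((board.getD (pickA (yn : Int) (xn : Int) (i : Int) (xn : Int) z).1.toNat []).getD
        (pickA (yn : Int) (xn : Int) (i : Int) (xn : Int) z).2.toNat 0)
      = (fun k => cellB board k xn) (((max i yn : Nat) : Int) - z).toNat := by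
    intro z h1 h2
    have hne' : ¬ ((i : Int) = (yn : Int)) := by
      intro h; exact hne (by exact_mod_cast h)
    rcases Nat.lt_trichotomy i yn with hiy | hiy | hiy
    · have hp : pickA (yn : Int) (xn : Int) (i : Int) (xn : Int) z = ((yn : Int) - z, (xn : Int)) := by
        rw [pickA, if_neg hne', if_pos rfl]
        simp only [pyAbs]
        split_ifs with hc1 hc2 hc3 <;> first
          | (exfalso; omega)
          | rfl
          | (simp only [Prod.mk.injEq, true_and, and_true]; omega)
      rw [hp]; simp only [cellB]; congr 2 <;> omega
    · exact absurd hiy hne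
    · have hp : pickA (yn : Int) (xn : Int) (i : Int) (xn : Int) z = ((i : Int) - z, (xn : Int)) := by
        rw [pickA, if_neg hne', if_pos rfl]
        simp only [pyAbs]
        split_ifs with hc1 hc2 hc3 <;> first
          | (exfalso; omega)
          | rfl
          | (simp only [Prod.mk.injEq, true_and, and_true]; omega)
      rw [hp]; simp only [cellB]; congr 2 <;> omega
  rw [whileA_char board _ _ _ _ (fun k => cellB board k xn) (min i yn) (max i yn) hd hcell
      (max (pyAbs ((xn : Int) - xn)) (pyAbs ((yn : Int) - i))).toNat 1 (by omega) (by rw [hd]; omega)]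
  simp only [clr, decide_eq_true_eq]
  constructor
  · intro H k h1 h2; exact H k h2 (by omega)
  · intro H k h1 h2; exact H k (by omega) h1


-- the common canonical form: four filtered index ranges around (yn, xn), in row-major order
def canon (board : List (List Int)) (piece : Int) (yn xn : Nat) : List (List Int) :=
  ((List.range yn).filter (fun i =>
      decide (cellB board i xn * piece ≤ 0) && clr (fun k => cellB board k xn) i yn)).map
    (fun (i : Nat) => [(i : Int), (xn : Int)])
  ++ ((List.range xn).filter (fun j =>
      decide (cellB board yn j * piece ≤ 0) && clr (fun k => cellB board yn k) j xn)).map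
    (fun (j : Nat) => [(yn : Int), (j : Int)])
  ++ (if cellB board yn xn * piece ≤ 0 then [[(yn : Int), (xn : Int)]] else [])
  ++ ((List.range' (xn+1) ((board.getD yn []).length - (xn+1))).filter (fun j =>
      decide (cellB board yn j * piece ≤ 0) && clr (fun k => cellB board yn k) xn j)).map
    (fun (j : Nat) => [(yn : Int), (j : Int)])
  ++ ((List.range' (yn+1) (board.length - (yn+1))).filter (fun i =>
      decide (cellB board i xn * piece ≤ 0) && clr (fun k => cellB board k xn) yn i)).map
    (fun (i : Nat) => [(i : Int), (xn : Int)])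

theorem B_canon (board : List (List Int)) (piece : Int) (y x : Int)
    (hy0 : 0 ≤ y) (hyh : y < (board.length : Int)) (hx0 : 0 ≤ x)
    (hxw : x < (((board.getD y.toNat []).length : Nat) : Int)) :
    validList_alt board piece y x = canon board piece y.toNat x.toNat := by
  simp only [validList_alt]
  rw [if_pos ⟨hy0, hyh, hx0, hxw⟩]
  rw [rayDown_eq, rayDown_eq, List.reverse_reverse, List.reverse_reverse,
      rayUp_eq (fun i => cellB board i x.toNat) board.length y.toNat board.length (by omega),
      rayUp_eq (fun j => cellB board y.toNat j) (board.getD y.toNat []).length x.toNat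
        (board.getD y.toNat []).length (by omega)]
  conv_lhs => simp only [List.filter_append, List.map_append, List.filter_map, List.map_map,
    Function.comp_def, List.filter_cons, List.filter_nil, List.map_cons, List.map_nil,
    List.filter_filter, apply_ite (List.map (fun c : Nat × Nat => [(c.1 : Int), (c.2 : Int)])),
    decide_eq_true_eq, List.append_assoc]
  simp only [canon, List.append_assoc]

-- A's per-square test, as one boolean
def condA (board : List (List Int)) (piece y x : Int) (i j : Nat) : Bool :=
  (decide ((i : Int) = y) || decide ((j : Int) = x)) &&
  whileA board y x (i : Int) (j : Int)
    (max (pyAbs (x - (j : Int))) (pyAbs (y - (i : Int)))).toNat 1 &&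
  decide (cellB board i j * piece ≤ 0)

theorem pv_flatMap_congr {α β : Type} (l : List α) (f g : α → List β)
    (h : ∀ a ∈ l, f a = g a) : l.flatMap f = l.flatMap g := by
  induction l with
  | nil => rfl
  | cons a t ih =>
    simp only [List.flatMap_cons, h a (by simp), ih (fun b hb => h b (by simp [hb]))]

theorem pv_flatMap_ite {α β : Type} (l : List α) (p : α → Bool) (f : α → β) :
    (l.flatMap fun a => if p a then [f a] else []) = (l.filter p).map f := by
  induction l with
  | nil => rfl
  | cons a t ih =>
    simp only [List.flatMap_cons, List.filter_cons]
    by_cases h : p a <;> simp [h, ih]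

theorem pv_range_split (n m : Nat) (h : m < n) :
    List.range n = List.range m ++ m :: List.range' (m+1) (n - (m+1)) := by
  rw [show (m :: List.range' (m+1) (n - (m+1))) = List.range' m ((n - (m+1)) + 1) from
        (List.range'_succ).symm,
      List.range_eq_range', List.range_eq_range',
      show List.range' m ((n - (m+1)) + 1) = List.range' (0+m) ((n - (m+1)) + 1) by norm_num,
      List.range'_append_1]
  congr 1
  omega

theorem pv_filter_single (w xn : Nat) (hx : xn < w) (q : Nat → Bool)
    (hq : ∀ j, j ≠ xn → q j = false) :
    (List.range w).filter q = if q xn then [xn] else [] := by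
  rw [pv_range_split w xn hx, List.filter_append, List.filter_cons]
  have e1 : (List.range xn).filter q = [] := by
    apply List.filter_eq_nil_iff.mpr
    intro a ha
    simp [hq a (by have := List.mem_range.mp ha; omega)]
  have e2 : (List.range' (xn+1) (w - (xn+1))).filter q = [] := by
    apply List.filter_eq_nil_iff.mpr
    intro a ha
    simp [hq a (by have := (List.mem_range'_1.mp ha).1; omega)]
  rw [e1, e2]
  split_ifs <;> simp

theorem A_flat (board : List (List Int)) (piece y x : Int) :
    validList board piece y x =
    (List.range board.length).flatMap (fun i =>
      ((List.range ((board.getD i []).length)).filter (condA board piece y x i)).map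
        (fun (j : Nat) => [(i : Int), (j : Int)])) := by
  unfold validList
  have hstep : ∀ (pos : List (List Int)) (i : Nat),
      (List.range ((board.getD i []).length)).foldl
        (fun (pos : List (List Int)) (j : Nat) =>
          if ((i : Int) = y ∨ (j : Int) = x) then
            if whileA board y x (i : Int) (j : Int)
                (max (pyAbs (x - (j : Int))) (pyAbs (y - (i : Int)))).toNat 1 then
              if (board.getD i []).getD j 0 * piece ≤ 0 then pos ++ [[(i : Int), (j : Int)]]
              else pos
            else pos
          else pos) pos
      = pos ++ ((List.range ((board.getD i []).length)).filter (condA board piece y x i)).map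
          (fun (j : Nat) => [(i : Int), (j : Int)]) := by
    intro pos i
    rw [PySem.List.foldl_congr_mem (List.range ((board.getD i []).length))
        (fun (pos : List (List Int)) (j : Nat) =>
          if ((i : Int) = y ∨ (j : Int) = x) then
            if whileA board y x (i : Int) (j : Int)
                (max (pyAbs (x - (j : Int))) (pyAbs (y - (i : Int)))).toNat 1 then
              if (board.getD i []).getD j 0 * piece ≤ 0 then pos ++ [[(i : Int), (j : Int)]]
              else pos
            else pos
          else pos)
        (fun (pos : List (List Int)) (j : Nat) =>
          if condA board piece y x i j then pos ++ [[(i : Int), (j : Int)]] else pos)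
        pos
        (by
          intro acc j _
          by_cases h1 : ((i : Int) = y ∨ (j : Int) = x)
          · by_cases h2 : whileA board y x (i : Int) (j : Int)
                (max (pyAbs (x - (j : Int))) (pyAbs (y - (i : Int)))).toNat 1
            · by_cases h3 : (board.getD i []).getD j 0 * piece ≤ 0
              · simp [condA, cellB, h1, h2, h3]
              · simp [condA, cellB, h1, h2, h3]
            · simp [condA, cellB, h1, h2]
          · have : ¬ ((i : Int) = y) ∧ ¬ ((j : Int) = x) := by tauto
            simp [condA, h1, this.1, this.2])]
    exact PySem.List.foldl_append_if _ _ _ _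
  rw [PySem.List.foldl_congr_mem (List.range board.length)
      (fun (pos : List (List Int)) (i : Nat) =>
        (List.range ((board.getD i []).length)).foldl
          (fun (pos : List (List Int)) (j : Nat) =>
            if ((i : Int) = y ∨ (j : Int) = x) then
              if whileA board y x (i : Int) (j : Int)
                  (max (pyAbs (x - (j : Int))) (pyAbs (y - (i : Int)))).toNat 1 then
                if (board.getD i []).getD j 0 * piece ≤ 0 then pos ++ [[(i : Int), (j : Int)]]
                else pos
              else pos
            else pos) pos)
      (fun (pos : List (List Int)) (i : Nat) =>
        pos ++ ((List.range ((board.getD i []).length)).filter (condA board piece y x i)).map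
          (fun (j : Nat) => [(i : Int), (j : Int)]))
      []
      (by intro acc i _; exact hstep acc i)]
  exact PySem.List.foldl_append_eq_flatMap _ _ _

theorem clr_self (g : Nat → Int) (a : Nat) : clr g a a = true := by
  simp only [clr, decide_eq_true_eq]; omega

theorem ite_cons_eq {α : Type} (c : Prop) [Decidable c] (a : α) (l : List α) :
    (if c then a :: l else l) = (if c then [a] else []) ++ l := by
  split_ifs <;> simp

theorem A_canon (board : List (List Int)) (piece y x : Int)
    (hy0 : 0 ≤ y) (hyh : y < (board.length : Int))
    (hx0 : 0 ≤ x) (hcol : ∀ row ∈ board, x < (row.length : Int)) :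
    validList board piece y x = canon board piece y.toNat x.toNat := by
  obtain ⟨yn, rfl⟩ := Int.eq_ofNat_of_zero_le hy0
  obtain ⟨xn, rfl⟩ := Int.eq_ofNat_of_zero_le hx0
  simp only [Int.toNat_natCast]
  have hynh : yn < board.length := by exact_mod_cast hyh
  have hcolx : ∀ i, i < board.length → xn < (board.getD i []).length := by
    intro i hi
    rw [List.getD_eq_getElem board [] hi]
    exact_mod_cast hcol _ (List.getElem_mem hi)
  have hxnw : xn < (board.getD yn []).length := hcolx yn hynh
  have hcondx : ∀ i : Nat, i ≠ yn → condA board piece (yn : Int) (xn : Int) i xn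
      = (decide (cellB board i xn * piece ≤ 0) &&
         clr (fun k => cellB board k xn) (min i yn) (max i yn)) := by
    intro i hne
    rw [Bool.eq_iff_iff]
    simp only [condA, Bool.and_eq_true, Bool.or_eq_true, decide_eq_true_eq,
      whileA_col board yn xn i hne]
    constructor
    · rintro ⟨⟨_, h2⟩, h3⟩; exact ⟨h3, h2⟩
    · rintro ⟨h3, h2⟩; exact ⟨⟨Or.inr trivial, h2⟩, h3⟩
  have hcondrow : ∀ j : Nat, condA board piece (yn : Int) (xn : Int) yn j
      = (decide (cellB board yn j * piece ≤ 0) &&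
         clr (fun k => cellB board yn k) (min j xn) (max j xn)) := by
    intro j
    rw [Bool.eq_iff_iff]
    simp only [condA, Bool.and_eq_true, Bool.or_eq_true, decide_eq_true_eq,
      whileA_row board yn xn j]
    constructor
    · rintro ⟨⟨_, h2⟩, h3⟩; exact ⟨h3, h2⟩
    · rintro ⟨h3, h2⟩; exact ⟨⟨Or.inl trivial, h2⟩, h3⟩
  have hq : ∀ i : Nat, i ≠ yn → ∀ j : Nat, j ≠ xn →
      condA board piece (yn : Int) (xn : Int) i j = false := by
    intro i hi j hj
    have h1 : (decide ((i : Int) = (yn : Int)) || decide ((j : Int) = (xn : Int))) = false := by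
      simp only [Bool.or_eq_false_iff, decide_eq_false_iff_not]
      constructor
      · intro h; exact hi (by exact_mod_cast h)
      · intro h; exact hj (by exact_mod_cast h)
    simp only [condA, h1, Bool.false_and]
  have hseg : ∀ i : Nat, i ≠ yn → i < board.length →
      ((List.range ((board.getD i []).length)).filter
          (condA board piece (yn : Int) (xn : Int) i)).map
        (fun (j : Nat) => [(i : Int), (j : Int)])
      = if (decide (cellB board i xn * piece ≤ 0) &&
            clr (fun k => cellB board k xn) (min i yn) (max i yn)) then
          [[(i : Int), (xn : Int)]] else [] := by
    intro i hne hi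
    rw [pv_filter_single _ xn (hcolx i hi) _ (hq i hne), hcondx i hne]
    split_ifs <;> simp
  rw [A_flat, pv_range_split board.length yn hynh, List.flatMap_append, List.flatMap_cons]
  -- rows above yn
  have hP1 : (List.range yn).flatMap (fun i =>
      ((List.range ((board.getD i []).length)).filter
          (condA board piece (yn : Int) (xn : Int) i)).map
        (fun (j : Nat) => [(i : Int), (j : Int)]))
      = ((List.range yn).filter (fun i =>
            decide (cellB board i xn * piece ≤ 0) &&
            clr (fun k => cellB board k xn) i yn)).map
          (fun (i : Nat) => [(i : Int), (xn : Int)]) := by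
    rw [pv_flatMap_congr _ _ (fun i =>
        if (decide (cellB board i xn * piece ≤ 0) &&
            clr (fun k => cellB board k xn) i yn) then [[(i : Int), (xn : Int)]] else [])
        (by
          intro i hi
          have hi' : i < yn := List.mem_range.mp hi
          rw [hseg i (by omega) (by omega),
              Nat.min_eq_left (by omega), Nat.max_eq_right (by omega)]),
        pv_flatMap_ite]
  -- rows below yn
  have hP3 : (List.range' (yn+1) (board.length - (yn+1))).flatMap (fun i =>
      ((List.range ((board.getD i []).length)).filter
          (condA board piece (yn : Int) (xn : Int) i)).map
        (fun (j : Nat) => [(i : Int), (j : Int)]))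
      = ((List.range' (yn+1) (board.length - (yn+1))).filter (fun i =>
            decide (cellB board i xn * piece ≤ 0) &&
            clr (fun k => cellB board k xn) yn i)).map
          (fun (i : Nat) => [(i : Int), (xn : Int)]) := by
    rw [pv_flatMap_congr _ _ (fun i =>
        if (decide (cellB board i xn * piece ≤ 0) &&
            clr (fun k => cellB board k xn) yn i) then [[(i : Int), (xn : Int)]] else [])
        (by
          intro i hi
          have hi' := List.mem_range'_1.mp hi
          rw [hseg i (by omega) (by omega),
              Nat.min_eq_right (by omega), Nat.max_eq_left (by omega)]),
        pv_flatMap_ite]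
  -- the row of the rook itself
  have hP2 : ((List.range ((board.getD yn []).length)).filter
        (condA board piece (yn : Int) (xn : Int) yn)).map
      (fun (j : Nat) => [(yn : Int), (j : Int)])
      = ((List.range xn).filter (fun j =>
            decide (cellB board yn j * piece ≤ 0) &&
            clr (fun k => cellB board yn k) j xn)).map
          (fun (j : Nat) => [(yn : Int), (j : Int)])
        ++ (if cellB board yn xn * piece ≤ 0 then [[(yn : Int), (xn : Int)]] else [])
        ++ ((List.range' (xn+1) ((board.getD yn []).length - (xn+1))).filter (fun j =>
            decide (cellB board yn j * piece ≤ 0) &&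
            clr (fun k => cellB board yn k) xn j)).map
          (fun (j : Nat) => [(yn : Int), (j : Int)]) := by
    rw [pv_range_split ((board.getD yn []).length) xn hxnw,
        List.filter_append, List.filter_cons,
        List.filter_congr (l := List.range xn) (q := fun j =>
          decide (cellB board yn j * piece ≤ 0) && clr (fun k => cellB board yn k) j xn)
          (by
            intro j hj
            have hj' : j < xn := List.mem_range.mp hj
            rw [hcondrow j, Nat.min_eq_left (by omega), Nat.max_eq_right (by omega)]),
        List.filter_congr (l := List.range' (xn+1) ((board.getD yn []).length - (xn+1)))
          (q := fun j =>
            decide (cellB board yn j * piece ≤ 0) && clr (fun k => cellB board yn k) xn j)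
          (by
            intro j hj
            have hj' := List.mem_range'_1.mp hj
            rw [hcondrow j, Nat.min_eq_right (by omega), Nat.max_eq_left (by omega)]),
        hcondrow xn, Nat.min_self, Nat.max_self, clr_self, Bool.and_true,
        ite_cons_eq]
    simp only [List.map_append, apply_ite (List.map (fun (j : Nat) => [(yn : Int), (j : Int)])),
      List.map_cons, List.map_nil, decide_eq_true_eq, List.append_assoc]
  rw [hP1, hP2, hP3]
  simp only [canon, List.append_assoc]

-- off-board rook row and no row reaches column x: A's loops never fire, so A returns []
theorem A_nil (board : List (List Int)) (piece y x : Int)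
    (hy : y < 0 ∨ (board.length : Int) ≤ y)
    (hx : ∀ row ∈ board, ¬ (0 ≤ x ∧ x < (row.length : Int))) :
    validList board piece y x = [] := by
  rw [A_flat]
  apply List.flatMap_eq_nil_iff.mpr
  intro i hi
  have hih : i < board.length := List.mem_range.mp hi
  apply List.map_eq_nil_iff.mpr
  apply List.filter_eq_nil_iff.mpr
  intro j hj
  have hjw : j < (board.getD i []).length := List.mem_range.mp hj
  have hrowmem : board.getD i [] ∈ board := by
    rw [List.getD_eq_getElem board [] hih]
    exact List.getElem_mem hih
  have h1 : ¬ ((i : Int) = y) := by omega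
  have h2 : ¬ ((j : Int) = x) := by
    intro h
    exact hx _ hrowmem ⟨by omega, by omega⟩
  simp [condA, h1, h2]

-- ===== VERDICT (by name: the statement is the Claim_ definition above) =====
theorem validList_spec : Claim_equal_validList := by
  intro board piece y x _hDom hPre
  unfold Spec_validList
  rcases hPre with ⟨hy0, hyh, hx0, hcol⟩ | ⟨hy, hx⟩
  · have hxw : x < (((board.getD y.toNat []).length : Nat) : Int) := by
      have hynh : y.toNat < board.length := by omega
      rw [List.getD_eq_getElem board [] hynh]
      exact hcol _ (List.getElem_mem hynh)
    rw [A_canon board piece y x hy0 hyh hx0 hcol, B_canon board piece y x hy0 hyh hx0 hxw]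
  · rw [A_nil board piece y x hy hx]
    simp only [validList_alt]
    rw [if_neg (by rintro ⟨h1, h2, -⟩; omega)]
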